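-- pv_equiv track=rewrite | github.com/ownerinspections/OI-website | rate_engine_internal/new_construction_stages.py | _validate_stages
-- ===== SOURCE A (Python) =====
-- from typing import Iterable, Any, Dict
--
-- def _validate_stages(stages: Iterable[int]) -> list[int]:
--     try:
--         stage_list = list(stages)
--     except TypeError as exc:  # not iterable
--         raise ValueError("'stages' must be a list of integers between 1 and 6") from exc
--
--     if not stage_list:
--         raise ValueError("'stages' must include at least one stage")
--
--     normalized: list[int] = []
--     seen: set[int] = set()
--     for s in stage_list:
--         if not isinstance(s, int):
--             raise ValueError("'stages' must contain integers only")
--         if s < 1 or s > 6: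
--             raise ValueError("'stages' values must be between 1 and 6")
--         if s in seen:
--             continue
--         seen.add(s)
--         normalized.append(s)
--     return normalized
-- ===== SOURCE B (Python) =====
-- def _validate_stages(stages):
--     try:
--         stage_list = list(stages)
--     except TypeError as exc:  # not iterable
--         raise ValueError("'stages' must be a list of integers between 1 and 6") from exc
--
--     if not stage_list:
--         raise ValueError("'stages' must include at least one stage")
--
--     if any(not isinstance(s, int) for s in stage_list):
--         raise ValueError("'stages' must contain integers only")
--     if min(stage_list) < 1 or max(stage_list) > 6:
--         raise ValueError("'stages' values must be between 1 and 6")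
--
--     # the value domain is fixed (1..6): pick the values that occur and order
--     # them by the position of their first occurrence
--     present = [v for v in range(1, 7) if v in stage_list]
--     return sorted(present, key=stage_list.index)
-- ===== Notes on version B (the rewrite author's own statement) =====
-- stated objective: alternative
-- what changed: Replaces A's single check-and-build loop with seen-set by a min/max range check followed by a fixed-domain dedup: enumerate the six possible values, keep those present, and sort them by first-occurrence index.
import Mathlib
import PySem

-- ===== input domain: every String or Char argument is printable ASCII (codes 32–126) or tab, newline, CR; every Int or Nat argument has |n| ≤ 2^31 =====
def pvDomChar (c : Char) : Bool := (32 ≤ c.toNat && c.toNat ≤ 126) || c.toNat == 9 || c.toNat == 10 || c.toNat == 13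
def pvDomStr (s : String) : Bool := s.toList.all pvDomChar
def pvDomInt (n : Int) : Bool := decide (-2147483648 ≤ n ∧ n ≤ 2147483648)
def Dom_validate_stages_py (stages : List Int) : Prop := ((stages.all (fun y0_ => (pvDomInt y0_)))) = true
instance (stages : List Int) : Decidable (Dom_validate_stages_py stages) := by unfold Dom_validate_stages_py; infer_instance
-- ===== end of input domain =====

-- B: min/max range check, then fixed-domain dedup — enumerate the six possible values,
-- keep the ones present and sort them by first-occurrence index (same return value as A wherever A returns).
-- ===== PORT A =====
-- A's loop: raise paths are modelled as `none`; they lie outside Pre_validate_stages_py.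
def pvALoop : List Int → List Int → PySem.Set Int → Option (List Int)
  | [], normalized, _ => some normalized
  | s :: rest, normalized, seen =>
    if s < 1 ∨ 6 < s then none                      -- raise ValueError (out of range)
    else if PySem.Set.contains seen s then pvALoop rest normalized seen
    else pvALoop rest (normalized ++ [s]) (PySem.Set.add seen s)

def validate_stages_py (stages : List Int) : List Int :=
  if stages = [] then []                            -- raise ValueError (empty); outside Pre_
  else (pvALoop stages [] PySem.Set.empty).getD []  -- getD only covers the raise path, outside Pre_

-- ===== PORT B =====
def validate_stages_py_alt (stages : List Int) : List Int :=
  if stages = [] then []                            -- raise ValueError (empty); outside Pre_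
  else
    -- isinstance check is vacuous on List Int
    match PySem.List.min? stages (fun x => x), PySem.List.max? stages (fun x => x) with
    | some mn, some mx =>
      if mn < 1 ∨ 6 < mx then []                    -- raise ValueError (out of range); outside Pre_
      else
        let present := (PySem.List.pyRange 1 7 1).filter (fun v => decide (v ∈ stages))
        PySem.List.sorted present (fun v => (PySem.List.index? stages v).getD 0) false
    | _, _ => []                                    -- unreachable: stages ≠ []

-- ===== PRECONDITION & SPEC =====
-- Pre_ excludes exactly the inputs on which A raises ValueError: the empty list and lists with a value outside 1..6.
def Pre_validate_stages_py (stages : List Int) : Prop :=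
  stages ≠ [] ∧ ∀ s ∈ stages, 1 ≤ s ∧ s ≤ 6
instance (stages : List Int) : Decidable (Pre_validate_stages_py stages) := by unfold Pre_validate_stages_py; infer_instance
def pvWitness_validate_stages_py : List Int := [3, 1, 3, 6]
def Spec_validate_stages_py (stages : List Int) (out : List Int) : Prop := out = validate_stages_py_alt stages
instance (stages : List Int) (out : List Int) : Decidable (Spec_validate_stages_py stages out) := by unfold Spec_validate_stages_py; infer_instance

-- ===== CLAIM (what is proved, stated in full; the proofs are below) =====
def Claim_equal_validate_stages_py : Prop := ∀ (stages : List Int), Dom_validate_stages_py stages → Pre_validate_stages_py stages → Spec_validate_stages_py stages (validate_stages_py stages)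

-- ===== LEMMAS AND PROOFS =====
-- In A, `seen` and `normalized` stay equal as lists (append happens exactly when the
-- element is new), so the loop computes Set.update of the accumulator.
lemma pvALoop_eq (l : List Int) (h : ∀ s ∈ l, 1 ≤ s ∧ s ≤ 6) :
    ∀ norm : List Int, pvALoop l norm norm = some (PySem.Set.update norm l) := by
  induction l with
  | nil => intro norm; simp [pvALoop, PySem.Set.update]
  | cons s rest ih =>
    intro norm
    obtain ⟨h1, h2⟩ := h s (List.mem_cons_self ..)
    have hrest : ∀ x ∈ rest, 1 ≤ x ∧ x ≤ 6 := fun x hx => h x (List.mem_cons_of_mem _ hx)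
    have hrange : ¬ (s < 1 ∨ 6 < s) := by omega
    by_cases hc : s ∈ norm <;>
      simp [pvALoop, hrange, hc, ih hrest, PySem.Set.update, List.foldl_cons,
        PySem.Set.add, PySem.Set.contains]

-- dedup of a cons: head first, then the tail's dedup with the head filtered out.
lemma pvDedup_cons (x : Int) (xs : List Int) :
    PySem.List.dedup (x :: xs) =
      x :: (PySem.List.dedup xs).filter (fun y => !(y == x)) := by
  simp only [PySem.List.dedup_eq_ofList, PySem.Set.ofList, List.foldl_cons]
  have h1 : PySem.Set.add PySem.Set.empty x = [x] := by rfl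
  rw [h1]
  have := PySem.Set.update_eq_append_filter [x] xs
  simp only [PySem.Set.update, PySem.Set.ofList] at this
  rw [this]
  have hf : (fun y => !PySem.Set.contains [x] y) = (fun y : Int => !(y == x)) := by
    funext y
    show (!List.contains [x] y) = _
    simp only [List.contains_cons, List.contains_nil, Bool.or_false]
  rw [hf]
  rfl

lemma pvDedup_pairwise (xs : List Int) :
    (PySem.List.dedup xs).Pairwise
      (fun a b => ((PySem.List.index? xs a).getD 0 : Nat) < (PySem.List.index? xs b).getD 0) := by
  induction xs with
  | nil => simp [PySem.List.dedup_eq_ofList, PySem.Set.ofList]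
  | cons x xs ih =>
    rw [pvDedup_cons]
    constructor
    · intro b hb
      have hbx : b ≠ x := by
        have := (List.mem_filter.mp hb).2; simpa using this
      have hbmem : b ∈ xs := by
        have := (List.mem_filter.mp hb).1
        exact (PySem.List.mem_dedup xs b).mp this
      obtain ⟨k, hk⟩ := Option.isSome_iff_exists.mp
        ((PySem.List.index?_isSome_iff xs b).mpr hbmem)
      rw [PySem.List.index?_cons_self, PySem.List.index?_cons_of_ne xs (Ne.symm hbx), hk]
      simp
    · refine List.Pairwise.imp_of_mem ?_ (List.Pairwise.sublist List.filter_sublist ih)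
      intro a b ha hb hlt
      have hax : a ≠ x := by have := (List.mem_filter.mp ha).2; simpa using this
      have hbx : b ≠ x := by have := (List.mem_filter.mp hb).2; simpa using this
      have hamem : a ∈ xs := (PySem.List.mem_dedup xs a).mp (List.mem_filter.mp ha).1
      have hbmem : b ∈ xs := (PySem.List.mem_dedup xs b).mp (List.mem_filter.mp hb).1
      obtain ⟨ka, hka⟩ := Option.isSome_iff_exists.mp ((PySem.List.index?_isSome_iff xs a).mpr hamem)
      obtain ⟨kb, hkb⟩ := Option.isSome_iff_exists.mp ((PySem.List.index?_isSome_iff xs b).mpr hbmem)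
      rw [PySem.List.index?_cons_of_ne xs (Ne.symm hax), PySem.List.index?_cons_of_ne xs (Ne.symm hbx), hka, hkb]
      rw [hka, hkb] at hlt
      simpa using Nat.add_lt_add_right (by simpa using hlt) 1

lemma pvPerm (stages : List Int) (h : ∀ s ∈ stages, 1 ≤ s ∧ s ≤ 6) :
    (PySem.List.dedup stages).Perm
      ((PySem.List.pyRange 1 7).filter (fun v => decide (v ∈ stages))) := by
  have hr : PySem.List.pyRange (1:Int) 7 = [1,2,3,4,5,6] := by decide
  refine (List.perm_ext_iff_of_nodup (PySem.List.nodup_dedup stages) ?_).mpr ?_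
  · exact List.Nodup.filter _ (by rw [hr]; decide)
  · intro a
    rw [List.mem_filter, PySem.List.mem_dedup]
    constructor
    · intro ha
      obtain ⟨h1, h2⟩ := h a ha
      exact ⟨PySem.List.mem_pyRange_one.mpr ⟨h1, by omega⟩, by simpa using ha⟩
    · intro ⟨_, ha⟩; simpa using ha

-- ===== VERDICT (by name: the statement is the Claim_ definition above) =====
theorem validate_stages_py_spec : Claim_equal_validate_stages_py := by
  intro stages _ ⟨hne, hrange⟩
  unfold Spec_validate_stages_py validate_stages_py validate_stages_py_alt
  rw [if_neg hne, if_neg hne]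
  cases hmn : PySem.List.min? stages (fun x => x) with
  | none => exact absurd ((PySem.List.min?_eq_none_iff ..).mp hmn) hne
  | some mn =>
  cases hmx : PySem.List.max? stages (fun x => x) with
  | none => exact absurd ((PySem.List.max?_eq_none_iff ..).mp hmx) hne
  | some mx =>
  have hmn1 : (1:Int) ≤ mn := (hrange mn (PySem.List.min?_mem hmn)).1
  have hmx6 : mx ≤ 6 := (hrange mx (PySem.List.max?_mem hmx)).2
  dsimp only
  rw [if_neg (by omega : ¬ (mn < 1 ∨ 6 < mx))]
  show (pvALoop stages [] []).getD [] = _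
  rw [pvALoop_eq stages hrange []]
  show PySem.Set.update [] stages = _
  rw [PySem.List.sorted_eq_of_perm_of_pairwise_lt _ (PySem.List.dedup stages) _
        (pvPerm stages hrange) (pvDedup_pairwise stages)]
  simp [PySem.List.dedup_eq_ofList, PySem.Set.ofList, PySem.Set.update]
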